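-- pv_equiv track=rewrite | github.com/CrazyTooler/Automatic_Layout | layout_test/cal_area.py | fullvpic
-- ===== SOURCE A (Python) =====
-- import math
--
-- def fullvpic(bw,bh,pic_count):
--     w=bw
--     #h=(3*w)/5 #限定图片比例为5：3
--     PS=0
--     ph=0
--     for i in range(0,pic_count):
--         #h=(pic[i][1]*w)/pic[i][0]#高度按照图片比例调整
--         h=math.floor(bh/pic_count)
--         ph=ph+h
--         PS=PS+w*h
--     return ph,PS
-- ===== SOURCE B (Python) =====
-- import math
--
-- def fullvpic(bw, bh, pic_count):
--     # Closed form: every iteration adds the same constant h, so the loop is a product.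
--     if pic_count <= 0:
--         return 0, 0
--     h = bh // pic_count
--     return pic_count * h, pic_count * bw * h
-- ===== Notes on version B (the rewrite author's own statement) =====
-- stated objective: faster
-- what changed: Replaced the O(pic_count) loop that adds the same constant h each iteration with the closed form (pic_count*h, pic_count*bw*h) with h = bh // pic_count.
import Mathlib
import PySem

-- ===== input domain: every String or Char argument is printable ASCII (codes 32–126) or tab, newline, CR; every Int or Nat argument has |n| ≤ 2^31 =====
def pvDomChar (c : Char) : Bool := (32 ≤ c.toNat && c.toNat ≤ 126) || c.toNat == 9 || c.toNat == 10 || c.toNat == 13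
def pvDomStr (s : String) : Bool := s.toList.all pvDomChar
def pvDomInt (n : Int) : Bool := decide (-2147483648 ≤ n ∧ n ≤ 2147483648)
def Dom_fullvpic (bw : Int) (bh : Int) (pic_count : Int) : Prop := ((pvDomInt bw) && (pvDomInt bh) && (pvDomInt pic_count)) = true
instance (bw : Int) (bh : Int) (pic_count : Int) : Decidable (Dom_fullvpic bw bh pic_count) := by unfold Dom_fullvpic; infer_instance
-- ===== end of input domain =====

-- B replaces A's O(pic_count) loop, which adds the same constant h every iteration, with the
-- O(1) closed form (pic_count*h, pic_count*bw*h). Equivalence is about the returned pair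
-- (ported as a two-element list).

-- ===== PORT A =====
-- math.floor(bh/pic_count) is ported as PySem.Int.floordiv: exact on Dom, where
-- |bh|, |pic_count| ≤ 2^31 < 2^53 so the float quotient floors to the integer floordiv.
def fullvpic (bw : Int) (bh : Int) (pic_count : Int) : List Int :=
  let w := bw
  let r := (PySem.List.pyRange 0 pic_count 1).foldl
    (fun (st : Int × Int) _ =>
      let h := PySem.Int.floordiv bh pic_count
      (st.1 + h, st.2 + w * h)) (0, 0)   -- st = (ph, PS)
  [r.1, r.2]

-- ===== PORT B =====
def fullvpic_alt (bw : Int) (bh : Int) (pic_count : Int) : List Int :=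
  if pic_count ≤ 0 then [0, 0]
  else
    let h := PySem.Int.floordiv bh pic_count
    [pic_count * h, pic_count * bw * h]

-- ===== PRECONDITION & SPEC =====
def Spec_fullvpic (bw : Int) (bh : Int) (pic_count : Int) (out : List Int) : Prop := out = fullvpic_alt bw bh pic_count
instance (bw : Int) (bh : Int) (pic_count : Int) (out : List Int) : Decidable (Spec_fullvpic bw bh pic_count out) := by unfold Spec_fullvpic; infer_instance

-- ===== CLAIM (what is proved, stated in full; the proofs are below) =====
def Claim_equal_fullvpic : Prop := ∀ (bw : Int) (bh : Int) (pic_count : Int), Dom_fullvpic bw bh pic_count → Spec_fullvpic bw bh pic_count (fullvpic bw bh pic_count)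

-- ===== LEMMAS AND PROOFS =====

-- folding a constant step over any list just counts its length
theorem foldl_const_step (h wh : Int) (l : List Int) (a b : Int) :
    l.foldl (fun (st : Int × Int) _ => (st.1 + h, st.2 + wh)) (a, b)
      = (a + l.length * h, b + l.length * wh) := by
  induction l generalizing a b with
  | nil => simp
  | cons x xs ih =>
      simp only [List.foldl_cons, ih, List.length_cons, Prod.mk.injEq]
      constructor <;> push_cast <;> ring

-- ===== VERDICT (by name: the statement is the Claim_ definition above) =====
theorem fullvpic_spec : Claim_equal_fullvpic := by
  intro bw bh pic_count _
  unfold Spec_fullvpic fullvpic fullvpic_alt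
  simp only []
  rw [foldl_const_step]
  rw [PySem.List.length_pyRange_one]
  by_cases hpc : pic_count ≤ 0
  · simp [hpc]
  · have h2 : ((pic_count - 0).toNat : Int) = pic_count := by omega
    simp only [h2, if_neg hpc, List.cons.injEq, and_true]
    constructor <;> ring
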